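-- pv_equiv track=rewrite | github.com/ZzinB/Algorithm_Study | 백준/Silver/3986. 좋은 단어/좋은 단어.py | solution
-- ===== SOURCE A (Python) =====
-- def solution(n, words):
--     cnt = 0
--
--     for word in words:
--         stack = []
--         for char in word:
--             if stack and stack[-1] == char:
--                 stack.pop()  # 짝이 맞으면 스택에서 제거
--             else:
--                 stack.append(char)  # 스택에 추가
--
--         if not stack:  # 스택이 비어있다면 '좋은 단어'
--             cnt += 1
--
--     return cnt
-- ===== SOURCE B (Python) =====
-- def solution(n, words):
--     cnt = 0
--     for word in words:
--         w = word
--         prev = None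
--         while w != prev:
--             prev = w
--             for c in dict.fromkeys(w):
--                 w = w.replace(c + c, "")
--         if not w:
--             cnt += 1
--     return cnt
-- ===== Notes on version B (the rewrite author's own statement) =====
-- stated objective: alternative
-- what changed: A runs a single left-to-right stack pass per word; B instead repeatedly deletes every adjacent equal pair via w.replace(c+c, '') for each distinct character until the word reaches a fixed point, and counts the word as good when that canonical reduced form is empty.
import Mathlib
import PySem

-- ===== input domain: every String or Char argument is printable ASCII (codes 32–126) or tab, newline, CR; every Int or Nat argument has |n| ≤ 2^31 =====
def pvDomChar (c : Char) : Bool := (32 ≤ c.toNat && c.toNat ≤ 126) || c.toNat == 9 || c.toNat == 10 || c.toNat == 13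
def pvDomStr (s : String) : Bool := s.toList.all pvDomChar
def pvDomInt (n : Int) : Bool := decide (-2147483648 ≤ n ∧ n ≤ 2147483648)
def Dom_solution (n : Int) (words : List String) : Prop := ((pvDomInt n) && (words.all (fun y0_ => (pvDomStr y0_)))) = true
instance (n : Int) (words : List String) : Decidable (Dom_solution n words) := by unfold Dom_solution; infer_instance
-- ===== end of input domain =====

-- B replaces A's single left-to-right stack pass by repeated adjacent-pair cancellation
-- (w.replace(c+c, '') for every distinct c, iterated to a fixed point); objective: alternative.

-- ===== PORT A =====
-- stack kept in Python's order: stack[-1] = getLast?, pop() = dropLast, append = ++ [char]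
def solution (n : Int) (words : List String) : Int :=
  words.foldl (fun cnt word =>
    let stack := word.toList.foldl
      (fun stack char =>
        if stack ≠ [] ∧ stack.getLast? = some char then stack.dropLast
        else stack ++ [char]) []
    if stack = [] then cnt + 1 else cnt) 0

-- ===== PORT B =====
-- pvRepc c l = what Python's l.replace(c+c, "") computes (proved equal to PySem.Chars.replace below);
-- needed by name so that pvCancelFix's termination proof can cite facts about the pass.
def pvRepc (c : Char) : List Char → List Char
  | c1 :: c2 :: t => if c1 = c ∧ c2 = c then pvRepc c t else c1 :: pvRepc c (c2 :: t)
  | l => l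

theorem pvRepc_len_le (c : Char) (l : List Char) : (pvRepc c l).length ≤ l.length := by
  fun_induction pvRepc c l with
  | case1 c1 c2 t h ih => simp only [List.length_cons] at *; omega
  | case2 c1 c2 t h ih => simp only [List.length_cons] at *; omega
  | case3 => exact le_refl _

theorem pvRepc_eq_of_len (c : Char) (l : List Char)
    (h : (pvRepc c l).length = l.length) : pvRepc c l = l := by
  fun_induction pvRepc c l with
  | case1 c1 c2 t hc ih =>
    exfalso
    have hle := pvRepc_len_le c t
    have h2 : (c1 :: c2 :: t).length = t.length + 2 := by simp
    omega
  | case2 c1 c2 t hc ih =>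
    have h2 : (c1 :: c2 :: t).length = (c2 :: t).length + 1 := by simp
    rw [ih (by simp at h ⊢; omega)]
  | case3 => rfl

-- the PySem.Chars.replace recursion with pattern [c,c] and empty replacement IS pvRepc
theorem pvReplace_go_eq (c : Char) : ∀ (fuel : Nat) (l acc : List Char),
    l.length ≤ fuel →
    PySem.Chars.replace.go [c, c] [] fuel l acc = acc.reverse ++ pvRepc c l := by
  intro fuel
  induction fuel with
  | zero =>
    intro l acc h
    have hl : l = [] := by cases l <;> simp_all
    subst hl; simp [PySem.Chars.replace.go, pvRepc]
  | succ f ih =>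
    intro l acc h
    match l with
    | [] => simp [PySem.Chars.replace.go, pvRepc]
    | [x] =>
      have hpre : (([c, c] : List Char).isPrefixOf [x]) = false := by
        simp [List.isPrefixOf]
      simp only [PySem.Chars.replace.go, hpre, Bool.false_eq_true, if_false]
      rw [ih [] (x :: acc) (by simp)]
      simp [pvRepc]
    | x :: y :: t =>
      by_cases hxy : x = c ∧ y = c
      · have hx := hxy.1
        have hy := hxy.2
        have hpre : (([c, c] : List Char).isPrefixOf (x :: y :: t)) = true := by
          simp [List.isPrefixOf, hx, hy]
        simp only [PySem.Chars.replace.go, hpre, if_true]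
        have hdrop : List.drop ([c, c] : List Char).length (x :: y :: t) = t := by simp
        rw [hdrop, ih t (([] : List Char).reverse ++ acc) (by simp at h ⊢; omega)]
        have hrepc : pvRepc c (x :: y :: t) = pvRepc c t := by
          simp [pvRepc, hx, hy]
        rw [hrepc]; simp
      · have hpre : (([c, c] : List Char).isPrefixOf (x :: y :: t)) = false := by
          by_cases h1 : c = x
          · by_cases h2 : c = y
            · exact absurd ⟨h1.symm, h2.symm⟩ hxy
            · have hxy2 : ¬x = y := fun hh => h2 (h1.trans hh)
              simp [List.isPrefixOf, h1, h2, hxy2]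
          · simp [List.isPrefixOf, h1]
        simp only [PySem.Chars.replace.go, hpre, Bool.false_eq_true, if_false]
        rw [ih (y :: t) (x :: acc) (by simp at h ⊢; omega)]
        have hr : pvRepc c (x :: y :: t) = x :: pvRepc c (y :: t) := by
          simp [pvRepc, hxy]
        rw [hr]; simp

theorem pvReplace_eq_repc (c : Char) (l : List Char) :
    PySem.Chars.replace l [c, c] [] = pvRepc c l := by
  show (if ([c, c] : List Char).isEmpty = true then _ else
    PySem.Chars.replace.go [c, c] [] l.length l []) = _
  simp only [List.isEmpty_cons, Bool.false_eq_true, if_false]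
  rw [pvReplace_go_eq c l.length l [] (le_refl _)]
  simp

-- one pass of B's inner for-loop: replace c+c by "" for every distinct character of w
def pvReplacePass (w : List Char) : List Char :=
  (PySem.List.dedup w).foldl (fun w c => PySem.Chars.replace w [c, c] []) w

theorem pvFoldlRepc_len_le (cs : List Char) (w : List Char) :
    (cs.foldl (fun w c => PySem.Chars.replace w [c, c] []) w).length ≤ w.length := by
  induction cs generalizing w with
  | nil => exact le_refl _
  | cons c cs ih =>
    simp only [List.foldl_cons]
    exact le_trans (ih _) (by rw [pvReplace_eq_repc]; exact pvRepc_len_le c w)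

theorem pvFoldlRepc_eq_of_len (cs : List Char) (w : List Char)
    (h : (cs.foldl (fun w c => PySem.Chars.replace w [c, c] []) w).length = w.length) :
    cs.foldl (fun w c => PySem.Chars.replace w [c, c] []) w = w := by
  induction cs generalizing w with
  | nil => rfl
  | cons c cs ih =>
    simp only [List.foldl_cons] at h ⊢
    have h1 := pvFoldlRepc_len_le cs (PySem.Chars.replace w [c, c] [])
    have h2 : (PySem.Chars.replace w [c, c] []).length ≤ w.length := by
      rw [pvReplace_eq_repc]; exact pvRepc_len_le c w
    have hstep : PySem.Chars.replace w [c, c] [] = w := by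
      rw [pvReplace_eq_repc]; exact pvRepc_eq_of_len c w (by rw [pvReplace_eq_repc] at *; omega)
    rw [hstep] at h ⊢
    exact ih w h

theorem pvReplacePass_len_le (w : List Char) : (pvReplacePass w).length ≤ w.length :=
  pvFoldlRepc_len_le _ w

-- B's while loop: repeat the pass until the word stops changing
def pvCancelFix (w : List Char) : List Char :=
  let w' := pvReplacePass w
  if w' = w then w' else pvCancelFix w'
termination_by w.length
decreasing_by
  have h1 := pvReplacePass_len_le w
  have h2 : (pvReplacePass w).length ≠ w.length := fun hl =>
    (by assumption : ¬ pvReplacePass w = w) (pvFoldlRepc_eq_of_len _ w hl)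
  omega

def solution_alt (n : Int) (words : List String) : Int :=
  words.foldl (fun cnt word =>
    if pvCancelFix word.toList = [] then cnt + 1 else cnt) 0

-- ===== PRECONDITION & SPEC =====
def Spec_solution (n : Int) (words : List String) (out : Int) : Prop := out = solution_alt n words
instance (n : Int) (words : List String) (out : Int) : Decidable (Spec_solution n words out) := by unfold Spec_solution; infer_instance

-- ===== CLAIM (what is proved, stated in full; the proofs are below) =====
def Claim_equal_solution : Prop := ∀ (n : Int) (words : List String), Dom_solution n words → Spec_solution n words (solution n words)

-- ===== LEMMAS AND PROOFS =====

-- cancelCons c r = prepend c to the reduced word r, cancelling against its head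
def pvCC (c : Char) : List Char → List Char
  | d :: t => if d = c then t else c :: d :: t
  | [] => [c]

-- the canonical reduced form (right fold of cancelling prepends)
def pvNF (l : List Char) : List Char := l.foldr pvCC []

-- "no adjacent equal pair"
def pvNA : List Char → Prop
  | a :: b :: t => a ≠ b ∧ pvNA (b :: t)
  | _ => True

theorem pvNA_pvCC (a : Char) (r : List Char) (h : pvNA r) : pvNA (pvCC a r) := by
  match r with
  | [] => simp [pvCC, pvNA]
  | [d] =>
    by_cases hd : d = a
    · simp [pvCC, hd, pvNA]
    · have had : a ≠ d := fun he => hd he.symm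
      simp [pvCC, hd, pvNA, had]
  | d :: e :: t =>
    by_cases hd : d = a
    · simpa [pvCC, hd] using h.2
    · have had : a ≠ d := fun he => hd he.symm
      simp only [pvCC, hd, if_false, pvNA]
      exact ⟨had, h⟩

theorem pvNA_pvNF (l : List Char) : pvNA (pvNF l) := by
  induction l with
  | nil => trivial
  | cons a l ih => exact pvNA_pvCC a _ ih

theorem pvCC_pvCC (a : Char) (r : List Char) (h : pvNA r) :
    pvCC a (pvCC a r) = r := by
  match r with
  | [] => simp [pvCC]
  | d :: t =>
    by_cases hd : d = a
    · subst hd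
      simp only [pvCC, if_true]
      match t, h with
      | [], _ => simp [pvCC]
      | e :: t', h =>
        have hed : ¬e = d := fun he => h.1 he.symm
        simp [pvCC, hed]
    · simp [pvCC, hd]

theorem pvNF_pvRepc (c : Char) (l : List Char) : pvNF (pvRepc c l) = pvNF l := by
  fun_induction pvRepc c l with
  | case1 c1 c2 t hc ih =>
    rw [ih]
    show pvNF t = pvCC c1 (pvCC c2 (pvNF t))
    rw [hc.1, hc.2, pvCC_pvCC c _ (pvNA_pvNF t)]
  | case2 c1 c2 t hc ih =>
    show pvCC c1 (pvNF (pvRepc c (c2 :: t))) = pvCC c1 (pvNF (c2 :: t))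
    rw [ih]
  | case3 => rfl

theorem pvNF_foldlRepc (cs : List Char) (w : List Char) :
    pvNF (cs.foldl (fun w c => PySem.Chars.replace w [c, c] []) w) = pvNF w := by
  induction cs generalizing w with
  | nil => rfl
  | cons c cs ih =>
    simp only [List.foldl_cons]
    rw [ih, pvReplace_eq_repc, pvNF_pvRepc]

theorem pvNF_pass (w : List Char) : pvNF (pvReplacePass w) = pvNF w :=
  pvNF_foldlRepc _ w

theorem pvNF_pvCancelFix (w : List Char) : pvNF (pvCancelFix w) = pvNF w := by
  fun_induction pvCancelFix w with
  | case1 w w' hw => rw [hw]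
  | case2 w w' hw ih => rw [ih, pvNF_pass]

-- if every per-character replace fixes w, every adjacent pair is unequal, so pvNF w = w
theorem pvRepc_fix_all (cs : List Char) (w : List Char)
    (h : cs.foldl (fun w c => PySem.Chars.replace w [c, c] []) w = w) :
    ∀ c ∈ cs, pvRepc c w = w := by
  induction cs generalizing w with
  | nil => intro c hc; cases hc
  | cons c cs ih =>
    simp only [List.foldl_cons] at h
    have h1 := pvFoldlRepc_len_le cs (PySem.Chars.replace w [c, c] [])
    have h2 : (PySem.Chars.replace w [c, c] []).length ≤ w.length := by
      rw [pvReplace_eq_repc]; exact pvRepc_len_le c w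
    have hlen : (PySem.Chars.replace w [c, c] []).length = w.length := by
      have := congrArg List.length h; omega
    have hstep : PySem.Chars.replace w [c, c] [] = w := by
      rw [pvReplace_eq_repc] at hlen ⊢; exact pvRepc_eq_of_len c w hlen
    rw [hstep] at h
    intro d hd
    rcases List.mem_cons.mp hd with rfl | hd'
    · rw [pvReplace_eq_repc] at hstep; exact hstep
    · exact ih w h d hd' 

theorem pvNF_of_fix (r : List Char) (h : ∀ c ∈ r, pvRepc c r = r) : pvNF r = r := by
  match r with
  | [] => rfl
  | [a] => rfl
  | a :: b :: t =>
    have hab : a ≠ b := by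
      intro hab; subst hab
      have := h a (by simp)
      have hlen := congrArg List.length this
      simp only [pvRepc, and_self, if_true] at this hlen
      have := pvRepc_len_le a t
      simp at hlen; omega
    have htail : ∀ c ∈ b :: t, pvRepc c (b :: t) = b :: t := by
      intro c hc
      have hr := h c (List.mem_cons_of_mem a hc)
      by_cases hac : a = c ∧ b = c
      · exact absurd (hac.1.trans hac.2.symm) hab
      · simp only [pvRepc, hac, if_false, List.cons.injEq] at hr
        exact hr.2
    have hNF : pvNF (b :: t) = b :: t := pvNF_of_fix (b :: t) htail
    show pvCC a (pvNF (b :: t)) = a :: b :: t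
    rw [hNF]
    have hba : ¬b = a := fun hh => hab hh.symm
    simp [pvCC, hba]

theorem pvCancelFix_is_fix (w : List Char) :
    pvReplacePass (pvCancelFix w) = pvCancelFix w := by
  fun_induction pvCancelFix w with
  | case1 w w' hw => rw [hw]; exact hw
  | case2 w w' hw ih => exact ih

-- B's loop computes exactly the reduced form
theorem pvCancelFix_eq_pvNF (w : List Char) : pvCancelFix w = pvNF w := by
  have hfix := pvCancelFix_is_fix w
  have hall := pvRepc_fix_all (PySem.List.dedup (pvCancelFix w)) (pvCancelFix w) hfix
  have hmem : ∀ c ∈ pvCancelFix w, pvRepc c (pvCancelFix w) = pvCancelFix w := by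
    intro c hc
    exact hall c (by
      show c ∈ PySem.Set.ofList (pvCancelFix w)
      exact (PySem.Set.mem_ofList _ c).mpr hc)
  calc pvCancelFix w = pvNF (pvCancelFix w) := (pvNF_of_fix _ hmem).symm
    _ = pvNF w := pvNF_pvCancelFix w

-- ---- A side: the stack is the reverse of the reduced form of the reversed word ----

theorem pvStack_step (s : List Char) (ch : Char) :
    (if s ≠ [] ∧ s.getLast? = some ch then s.dropLast else s ++ [ch])
      = (pvCC ch s.reverse).reverse := by
  induction s using List.reverseRecOn with
  | nil => simp [pvCC]
  | append_singleton xs x _ =>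
    by_cases hx : x = ch
    · subst hx
      simp [pvCC]
    · have hne : ¬(xs ++ [x] ≠ [] ∧ (xs ++ [x]).getLast? = some ch) := by
        intro hcon
        apply hx
        have h2 := hcon.2
        simpa [List.getLast?_append] using h2
      rw [if_neg hne]
      simp [pvCC, hx]

theorem pvStack_foldl (l : List Char) : ∀ (s : List Char),
    l.foldl (fun stack char =>
      if stack ≠ [] ∧ stack.getLast? = some char then stack.dropLast
      else stack ++ [char]) s
    = (l.foldl (fun r ch => pvCC ch r) s.reverse).reverse := by
  induction l with
  | nil => intro s; simp
  | cons a l ih =>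
    intro s
    simp only [List.foldl_cons]
    rw [pvStack_step, ih, List.reverse_reverse]

-- ---- the reduced form of the reversed word is the reverse of the reduced form ----

def pvSC : List Char → Char → List Char
  | [], c => [c]
  | [d], c => if d = c then [] else [d, c]
  | d :: e :: t, c => d :: pvSC (e :: t) c

theorem pvCC_pvSC (a : Char) (r : List Char) (c : Char) :
    pvCC a (pvSC r c) = pvSC (pvCC a r) c := by
  match r with
  | [] =>
    by_cases hac : a = c
    · simp [pvSC, pvCC, hac]
    · have hca : ¬c = a := fun hh => hac hh.symm
      simp [pvSC, pvCC, hac, hca]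
  | [d] =>
    by_cases hdc : d = c
    · by_cases hda : d = a
      · have hac : a = c := hda.symm.trans hdc
        simp [pvSC, pvCC, hdc, hda, hac]
      · have had : ¬a = d := fun hh => hda hh.symm
        have hca : ¬c = a := fun hh => hda (hdc.trans hh)
        simp [pvSC, pvCC, hdc, hda, had, hca]
    · by_cases hda : d = a
      · have hac : ¬a = c := fun hh => hdc (hda.trans hh)
        have hca : ¬c = a := fun hh => hac hh.symm
        simp [pvSC, pvCC, hdc, hda, hac, hca]
      · simp [pvSC, pvCC, hdc, hda]
  | d :: e :: t =>
    by_cases hda : d = a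
    · simp [pvSC, pvCC, hda]
    · simp [pvSC, pvCC, hda]

theorem pvNF_snoc (l : List Char) (c : Char) : pvNF (l ++ [c]) = pvSC (pvNF l) c := by
  induction l with
  | nil => simp [pvNF, pvSC, pvCC]
  | cons a l ih =>
    show pvCC a (pvNF (l ++ [c])) = pvSC (pvCC a (pvNF l)) c
    rw [ih, pvCC_pvSC]

theorem pvSC_snoc (xs : List Char) (d a : Char) :
    pvSC (xs ++ [d]) a = if d = a then xs else xs ++ [d, a] := by
  induction xs with
  | nil => simp [pvSC]
  | cons x xs ih =>
    match xs with
    | [] =>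
      by_cases hda : d = a <;> simp [pvSC, hda]
    | y :: ys =>
      show x :: pvSC (y :: ys ++ [d]) a = _
      rw [ih]
      by_cases hda : d = a <;> simp [hda]

theorem pvSC_reverse (r : List Char) (a : Char) :
    pvSC r.reverse a = (pvCC a r).reverse := by
  match r with
  | [] => simp [pvSC, pvCC]
  | d :: t =>
    rw [show (d :: t).reverse = t.reverse ++ [d] by simp, pvSC_snoc]
    by_cases hda : d = a <;> simp [pvCC, hda]

theorem pvNF_reverse (l : List Char) : pvNF l.reverse = (pvNF l).reverse := by
  induction l with
  | nil => rfl
  | cons a l ih =>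
    rw [show (a :: l).reverse = l.reverse ++ [a] by simp, pvNF_snoc, ih, pvSC_reverse]
    rfl

-- per-word agreement: A's stack is empty iff B's fixed point is empty
theorem pvWord_agree (word : String) :
    (word.toList.foldl (fun stack char =>
        if stack ≠ [] ∧ stack.getLast? = some char then stack.dropLast
        else stack ++ [char]) [] = [])
    = (pvCancelFix word.toList = []) := by
  rw [pvStack_foldl word.toList []]
  rw [show ([] : List Char).reverse = [] from rfl]
  rw [show word.toList.foldl (fun r ch => pvCC ch r) [] =
      word.toList.reverse.foldr pvCC [] from (List.foldr_reverse).symm]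
  rw [show word.toList.reverse.foldr pvCC [] = pvNF word.toList.reverse from rfl]
  rw [pvNF_reverse, pvCancelFix_eq_pvNF]
  simp

-- ===== VERDICT (by name: the statement is the Claim_ definition above) =====
theorem solution_spec : Claim_equal_solution := by
  intro n words hdom
  show solution n words = solution_alt n words
  clear hdom
  unfold solution solution_alt
  induction words using List.reverseRecOn with
  | nil => rfl
  | append_singleton ws w ih =>
    simp only [List.foldl_append, List.foldl_cons, List.foldl_nil]
    rw [ih]
    exact if_congr (iff_of_eq (pvWord_agree w)) rfl rfl
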